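-- pv_equiv track=rewrite | github.com/JuanBoggino/Othello-Prog2 | PYTHON/tablero.py | cuenta_piezas
-- ===== SOURCE A (Python) =====
-- def cuenta_piezas(tablero):
--     """
--     Si el tablero esta lleno, cuenta la cantidad de piezas
--     hay de cada jugador en el tablero
--     Args:
--         tablero (matriz 8x8):
--     Returns:
--         tupla: Tupla de 2 enteros
--     """
--     contador_negras = 0
--     contador_blancas = 0
--
--
--     for fila in tablero:
--
--         for casilla in fila:
--
--             if casilla == 'N':
--                 contador_negras += 1
--
--             else:
--                 contador_blancas += 1
--
--     return contador_negras, contador_blancas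
-- ===== SOURCE B (Python) =====
-- def cuenta_piezas(tablero):
--     conteo = {}
--     for fila in tablero:
--         for casilla in fila:
--             conteo[casilla] = conteo.get(casilla, 0) + 1
--     contador_negras = conteo.get('N', 0)
--     contador_blancas = sum(v for k, v in conteo.items() if k != 'N')
--     return contador_negras, contador_blancas
-- ===== Notes on version B (the rewrite author's own statement) =====
-- stated objective: alternative
-- what changed: B builds a per-symbol histogram dict in one sweep and then derives the answer from the dict: blacks = histogram lookup of 'N', whites = sum of the counts of every other key; A keeps two running counters with a per-cell if/else.
import Mathlib
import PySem

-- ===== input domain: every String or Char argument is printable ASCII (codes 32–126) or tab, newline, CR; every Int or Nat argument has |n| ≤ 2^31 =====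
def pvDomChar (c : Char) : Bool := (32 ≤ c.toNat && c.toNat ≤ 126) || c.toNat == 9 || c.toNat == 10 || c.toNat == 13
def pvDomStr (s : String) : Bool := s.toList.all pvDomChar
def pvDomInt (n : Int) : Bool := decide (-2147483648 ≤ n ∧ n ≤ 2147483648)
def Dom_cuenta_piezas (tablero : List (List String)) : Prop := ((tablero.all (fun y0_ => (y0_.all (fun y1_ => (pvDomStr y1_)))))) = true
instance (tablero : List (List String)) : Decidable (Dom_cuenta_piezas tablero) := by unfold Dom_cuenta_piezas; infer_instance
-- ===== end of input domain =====

-- B replaces A's two running if/else counters by a per-symbol histogram dict built in one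
-- sweep, then reads blacks off the dict and sums the counts of the other keys (alternative
-- decomposition, same cost).

-- ===== PORT A =====
-- nested loop: per cell, increment negras if 'N' else blancas
def cuenta_piezas (tablero : List (List String)) : Int × Int :=
  tablero.foldl
    (fun acc fila => fila.foldl
      (fun (acc2 : Int × Int) casilla =>
        if casilla == "N" then (acc2.1 + 1, acc2.2) else (acc2.1, acc2.2 + 1))
      acc)
    (0, 0)

-- ===== PORT B =====
-- B: histogram dict of all symbols; negras = conteo.get('N', 0),
-- blancas = sum(v for k, v in conteo.items() if k != 'N')
def cuenta_piezas_alt (tablero : List (List String)) : Int × Int :=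
  let conteo : PySem.Dict String Int :=
    tablero.foldl
      (fun d fila => fila.foldl
        (fun (d : PySem.Dict String Int) casilla => d.modify casilla 0 (· + 1)) d)
      PySem.Dict.empty
  let contador_negras : Int := conteo.getD "N" 0
  let contador_blancas : Int :=
    ((conteo.items.filter (fun p => p.1 ≠ "N")).map (·.2)).sum
  (contador_negras, contador_blancas)

-- ===== PRECONDITION & SPEC =====
def Spec_cuenta_piezas (tablero : List (List String)) (out : Int × Int) : Prop := out = cuenta_piezas_alt tablero
instance (tablero : List (List String)) (out : Int × Int) : Decidable (Spec_cuenta_piezas tablero out) := by unfold Spec_cuenta_piezas; infer_instance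

-- ===== CLAIM (what is proved, stated in full; the proofs are below) =====
def Claim_equal_cuenta_piezas : Prop := ∀ (tablero : List (List String)), Dom_cuenta_piezas tablero → Spec_cuenta_piezas tablero (cuenta_piezas tablero)

-- ===== LEMMAS AND PROOFS =====

-- A's inner loop, flattened: the pair fold computes (count of "N", rest)
theorem cpA_foldl (L : List String) (a b : Int) :
    L.foldl (fun (acc2 : Int × Int) casilla =>
        if casilla == "N" then (acc2.1 + 1, acc2.2) else (acc2.1, acc2.2 + 1)) (a, b)
      = (a + L.count "N", b + ((L.length : Int) - L.count "N")) := by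
  induction L generalizing a b with
  | nil => simp
  | cons c t ih =>
    simp only [List.foldl_cons]
    by_cases h : c = "N"
    · rw [if_pos (by simp [h]), ih]
      simp [h, Prod.mk.injEq]
      omega
    · rw [if_neg (by simp [h]), ih]
      simp [h, Prod.mk.injEq]
      omega

-- A's result in terms of the flattened board
theorem cpA_eq (tablero : List (List String)) :
    cuenta_piezas tablero
      = ((tablero.flatten.count "N" : Int),
         (tablero.flatten.length : Int) - tablero.flatten.count "N") := by
  unfold cuenta_piezas
  rw [← List.foldl_flatten]
  simpa using cpA_foldl tablero.flatten 0 0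

-- B's histogram is Counter(flattened board)
theorem cpB_counter (tablero : List (List String)) :
    tablero.foldl
      (fun d fila => fila.foldl
        (fun (d : PySem.Dict String Int) casilla => d.modify casilla 0 (· + 1)) d)
      PySem.Dict.empty
      = PySem.Dict.counter tablero.flatten := by
  rw [PySem.Dict.counter_eq_foldl, ← List.foldl_flatten]

-- summing full counts over a Nodup key list that enumerates M's members gives M's length
theorem sum_counts (ks : List String) (M : List String)
    (hnd : ks.Nodup) (hmem : ∀ x, x ∈ ks ↔ x ∈ M) :
    (ks.map (fun k => (M.count k : Int))).sum = (M.length : Int) := by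
  have hperm : ks.Perm M.dedup :=
    (List.perm_ext_iff_of_nodup hnd M.nodup_dedup).mpr
      (fun a => by rw [hmem a, List.mem_dedup])
  calc (ks.map (fun k => (M.count k : Int))).sum
      = ((ks.map M.count).sum : Nat) := by
        rw [Nat.cast_list_sum, List.map_map]; rfl
    _ = ((M.dedup.map M.count).sum : Nat) := by
        rw [(hperm.map M.count).sum_eq]
    _ = (M.length : Int) := by rw [List.sum_map_count_dedup_eq_length]

-- B's white count: sum over non-"N" keys of their counts = #cells - count "N"
theorem cpB_blancas (L : List String) :
    ((((PySem.Dict.counter L).items.filter (fun p => p.1 ≠ "N")).map (·.2)).sum : Int)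
      = (L.length : Int) - L.count "N" := by
  rw [PySem.Dict.items_counter, List.filter_map, List.map_map]
  set M := L.filter (fun c => c ≠ "N") with hM
  have hcnt : ∀ k ∈ (PySem.Set.ofList L).filter (fun k => decide ¬(k, (L.count k : Int)).1 = "N"),
      (L.count k : Int) = (M.count k : Int) := by
    intro k hk
    have hk' : k ≠ "N" := by
      simp only [List.mem_filter] at hk
      simpa using hk.2
    rw [hM]
    simp [List.count_filter, hk']
  rw [List.map_congr_left (by intro k hk; exact hcnt k hk)]
  rw [sum_counts _ M]
  · have : (M.length : Int) = ((L.length : Int) - L.count "N") := by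
      rw [hM]
      have hsplit : (L.filter (fun c => c ≠ "N")).length + L.count "N" = L.length := by
        rw [← List.countP_eq_length_filter, List.count]
        have h1 := List.length_eq_countP_add_countP (l := L) (p := fun c => c == "N")
        have he : List.countP (fun a => decide ¬(a == "N") = true) L
            = List.countP (fun c => decide (c ≠ "N")) L := by
          apply List.countP_congr; intro x _; simp
        omega
      omega
    rw [← this]
  · exact (PySem.Set.nodup_ofList L).filter _
  · intro x
    simp [PySem.Set.mem_ofList, hM, List.mem_filter]

-- ===== VERDICT (by name: the statement is the Claim_ definition above) =====
theorem cuenta_piezas_spec : Claim_equal_cuenta_piezas := by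
  intro tablero _
  unfold Spec_cuenta_piezas
  rw [cpA_eq]
  simp only [cuenta_piezas_alt, cpB_counter, PySem.Dict.getD_counter, cpB_blancas]
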